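-- pv_equiv track=rewrite | github.com/IgnacyBerent/AoC_2023_python | day_14/task_1.py | move_platform
-- ===== SOURCE A (Python) =====
-- def move_platform(data_platform: list[list[str]]) -> list[list[str]]:
--     shifts = 0
--     for y, line in enumerate(data_platform):
--         for x, char in enumerate(line):
--             if y > 0:
--                 if char == 'O':
--                     if data_platform[y - 1][x] == '.':
--                         shifts += 1
--                         data_platform[y - 1][x] = 'O'
--                         data_platform[y][x] = '.'
--     if shifts == 0:
--         return data_platform
--     else:
--         return move_platform(data_platform)
-- ===== SOURCE B (Python) =====
-- # B: single top-to-bottom sweep per column keeping the next free row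
-- # instead of A's repeated whole-grid bubbling passes; mutates data_platform in place like A.
-- def move_platform(data_platform: list[list[str]]) -> list[list[str]]:
--     width = max((len(row) for row in data_platform), default=0)
--     for x in range(width):
--         free = 0
--         for y, row in enumerate(data_platform):
--             if x >= len(row):
--                 free = y + 1
--             elif row[x] == 'O':
--                 row[x] = '.'
--                 data_platform[free][x] = 'O'
--                 free += 1
--             elif row[x] != '.':
--                 free = y + 1
--     return data_platform
-- ===== Notes on version B (the rewrite author's own statement) =====
-- stated objective: alternative
-- what changed: A repeatedly re-scans the whole grid, bubbling every round rock up one row per pass and recursing until a pass makes no shift; B makes a single top-to-bottom sweep per column, keeping the next free row after the last obstacle/settled rock and placing each 'O' there directly.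
import Mathlib
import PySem

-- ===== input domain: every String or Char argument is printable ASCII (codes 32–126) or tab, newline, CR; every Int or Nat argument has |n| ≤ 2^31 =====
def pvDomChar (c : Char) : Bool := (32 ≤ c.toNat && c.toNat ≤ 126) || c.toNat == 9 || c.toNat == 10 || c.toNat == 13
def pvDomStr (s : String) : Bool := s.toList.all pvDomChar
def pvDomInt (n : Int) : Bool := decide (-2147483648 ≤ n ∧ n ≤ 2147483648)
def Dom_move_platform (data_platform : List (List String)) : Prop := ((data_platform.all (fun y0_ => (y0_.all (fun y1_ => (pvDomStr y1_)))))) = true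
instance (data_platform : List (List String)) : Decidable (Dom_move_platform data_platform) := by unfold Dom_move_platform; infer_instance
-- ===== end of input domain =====

-- B is a single top-to-bottom sweep per column keeping the next free row, instead of A's
-- repeated whole-grid one-step bubbling passes; both Pythons mutate the argument in place and
-- return it — the equivalence proved here is about the return value.

-- ===== PORT A =====
-- d[y][x] = v  (both indices valid whenever executed; Python list assignment)
def setCell (g : List (List String)) (y x : Nat) (v : String) : List (List String) :=
  g.set y ((g.getD y []).set x v)

-- body of A's innermost loop iteration at (y, x): state = (shifts, data_platform)
def stepCell (y x : Nat) (s : Nat × List (List String)) : Nat × List (List String) :=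
  if y > 0 then
    if (s.2.getD y []).getD x "" = "O" then
      if (s.2.getD (y - 1) []).getD x "" = "." then
        (s.1 + 1, setCell (setCell s.2 (y - 1) x "O") y x ".")
      else s
    else s
  else s

-- A's inner loop over one line ("for x, char in enumerate(line): ...")
def passRow (s : Nat × List (List String)) (y : Nat) : Nat × List (List String) :=
  (List.range ((s.2.getD y []).length)).foldl (fun s' x => stepCell y x s') s

-- one full double loop of A ("for y, line in enumerate(...): ...")
def passGrid (g : List (List String)) : Nat × List (List String) :=
  (List.range g.length).foldl passRow (0, g)

-- ---- potential function justifying A's termination (cited by decreasing_by) ----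
theorem pvFoldlInv {α σ : Type} (P : σ → Prop) (f : σ → α → σ)
    (hstep : ∀ s a, P s → P (f s a)) :
    ∀ (l : List α) (s : σ), P s → P (l.foldl f s) := by
  intro l
  induction l with
  | nil => exact fun s h => h
  | cons a t ih => exact fun s h => ih _ (hstep s a h)

theorem pvGetDSetNe {α : Type} (l : List α) (i j : Nat) (a d : α) (h : i ≠ j) :
    (l.set i a).getD j d = l.getD j d := by
  simp [List.getD, List.getElem?_set_ne h]

theorem pvLtOfGetDNe {α : Type} (l : List α) (i : Nat) (d : α) (h : l.getD i d ≠ d) :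
    i < l.length := by
  by_contra hn
  exact h (List.getD_eq_default _ _ (Nat.le_of_not_lt hn))

theorem pvGetElemSomeOfGetD {α : Type} (l : List α) (i : Nat) (d v : α)
    (h : l.getD i d = v) (hi : i < l.length) : l[i]? = some v := by
  rw [List.getElem?_eq_getElem hi]
  rw [List.getD_eq_getElem l d hi] at h
  exact congrArg some h

theorem pvCellValid (g : List (List String)) (y x : Nat)
    (h : (g.getD y []).getD x "" ≠ "") :
    x < (g.getD y []).length ∧ y < g.length := by
  refine ⟨pvLtOfGetDNe _ _ _ h, ?_⟩
  apply pvLtOfGetDNe g y ([] : List String)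
  intro hrow
  rw [hrow] at h
  simp at h

theorem pvCountSetODot : ∀ (r : List String) (x : Nat), r[x]? = some "O" →
    (r.set x ".").count "O" + 1 = r.count "O" := by
  intro r
  induction r with
  | nil => intro x h; simp at h
  | cons a t ih =>
    intro x h
    cases x with
    | zero =>
      simp at h
      subst h
      simp
    | succ n =>
      simp at h
      have := ih n h
      simp [List.count_cons]
      omega

theorem pvCountSetDotO : ∀ (r : List String) (x : Nat), r[x]? = some "." →
    (r.set x "O").count "O" = r.count "O" + 1 := by
  intro r
  induction r with
  | nil => intro x h; simp at h
  | cons a t ih =>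
    intro x h
    cases x with
    | zero =>
      simp at h
      subst h
      simp
    | succ n =>
      simp at h
      have := ih n h
      simp [List.count_cons]
      omega

def phiAux : Nat → List (List String) → Nat
  | _, [] => 0
  | i, r :: t => i * r.count "O" + phiAux (i + 1) t

def phi (g : List (List String)) : Nat := phiAux 0 g

theorem pvPhiAuxSet : ∀ (g : List (List String)) (i y : Nat) (r' : List String), y < g.length →
    phiAux i (g.set y r') + (i + y) * ((g.getD y []).count "O")
      = phiAux i g + (i + y) * (r'.count "O") := by
  intro g
  induction g with
  | nil => intro i y r' h; simp at h
  | cons r t ih =>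
    intro i y r' h
    cases y with
    | zero =>
      simp [phiAux, List.getD]
      ring
    | succ n =>
      simp at h
      have := ih (i + 1) n r' h
      simp [phiAux, List.getD] at *
      have harith : i + 1 + n = i + (n + 1) := by omega
      rw [harith] at this
      omega

theorem pvPhiSwap (g : List (List String)) (y x : Nat) (hy : 0 < y)
    (hO : (g.getD y []).getD x "" = "O") (hD : (g.getD (y - 1) []).getD x "" = ".") :
    phi (setCell (setCell g (y - 1) x "O") y x ".") + 1 = phi g := by
  obtain ⟨hx, hyl⟩ := pvCellValid g y x (by rw [hO]; decide)
  obtain ⟨hx1, hy1l⟩ := pvCellValid g (y - 1) x (by rw [hD]; decide)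
  have hne : y - 1 ≠ y := by omega
  have hg1row : (g.set (y - 1) ((g.getD (y - 1) []).set x "O")).getD y [] = g.getD y [] :=
    pvGetDSetNe _ _ _ _ _ hne
  have eq1 := pvPhiAuxSet g 0 (y - 1) ((g.getD (y - 1) []).set x "O") hy1l
  have eq2 := pvPhiAuxSet (g.set (y - 1) ((g.getD (y - 1) []).set x "O")) 0 y
      ((g.getD y []).set x ".") (by rw [List.length_set]; exact hyl)
  have c1 := pvCountSetDotO (g.getD (y - 1) []) x (pvGetElemSomeOfGetD _ _ _ _ hD hx1)
  have c2 := pvCountSetODot (g.getD y []) x (pvGetElemSomeOfGetD _ _ _ _ hO hx)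
  simp only [Nat.zero_add] at eq1 eq2
  rw [hg1row] at eq2
  rw [c1, Nat.mul_add, Nat.mul_one] at eq1
  rw [← c2, Nat.mul_add, Nat.mul_one] at eq2
  show phi ((g.set (y - 1) ((g.getD (y - 1) []).set x "O")).set y ((g.set (y - 1)
      ((g.getD (y - 1) []).set x "O")).getD y [] |>.set x ".")) + 1 = phi g
  rw [hg1row]
  unfold phi
  generalize (y - 1) * ((g.getD (y - 1) []).count "O") = A at eq1
  generalize y * (((g.getD y []).set x ".").count "O") = B at eq2
  omega

theorem pass_phi (g : List (List String)) :
    phi (passGrid g).2 + (passGrid g).1 = phi g := by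
  have hstep : ∀ (y x : Nat) (s : Nat × List (List String)), phi s.2 + s.1 = phi g →
      phi (stepCell y x s).2 + (stepCell y x s).1 = phi g := by
    intro y x s hP
    unfold stepCell
    split_ifs with h1 h2 h3
    · have := pvPhiSwap s.2 y x h1 h2 h3
      simp only []
      omega
    all_goals exact hP
  exact pvFoldlInv (fun s => phi s.2 + s.1 = phi g) passRow
    (fun s y hP => pvFoldlInv _ _ (fun s' x h => hstep y x s' h) _ s hP)
    _ (0, g) (by simp)

-- A, transliterated: repeat the double bubbling loop until a pass makes no shift.
def move_platform (data_platform : List (List String)) : List (List String) :=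
  if _h : (passGrid data_platform).1 = 0 then (passGrid data_platform).2
  else move_platform (passGrid data_platform).2
termination_by phi data_platform
decreasing_by
  have hp := pass_phi data_platform
  omega

-- ===== PORT B =====
-- width = max(len(row) for row in data_platform) with default 0
def widthG (g : List (List String)) : Nat := g.foldl (fun m r => max m r.length) 0

-- body of B's inner loop at row y for column x: state = (free, data_platform)
def colStep (x : Nat) (s : Nat × List (List String)) (y : Nat) : Nat × List (List String) :=
  if (s.2.getD y []).length ≤ x then (y + 1, s.2)
  else if (s.2.getD y []).getD x "" = "O" then
    (s.1 + 1, setCell (setCell s.2 y x ".") s.1 x "O")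
  else if (s.2.getD y []).getD x "" ≠ "." then (y + 1, s.2)
  else s

-- B's inner loop: one sweep down column x
def settleColGrid (x : Nat) (g : List (List String)) : List (List String) :=
  ((List.range g.length).foldl (colStep x) (0, g)).2

def move_platform_alt (data_platform : List (List String)) : List (List String) :=
  (List.range (widthG data_platform)).foldl (fun h x => settleColGrid x h) data_platform

-- ===== PRECONDITION & SPEC =====
-- Pre_ excludes exactly the inputs on which A raises IndexError: some round rock, rolling
-- north through dots, reaches a row whose predecessor row is too short at the rock's column.
def Pre_move_platform (data_platform : List (List String)) : Prop :=
  ¬ ∃ yp < data_platform.length, ∃ x < (data_platform.getD yp []).length, ∃ y < yp + 1,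
      0 < y ∧ (data_platform.getD yp []).getD x "" = "O" ∧
      (∀ t < yp, y ≤ t → (data_platform.getD t []).getD x "" = ".") ∧
      (data_platform.getD (y - 1) []).length ≤ x
instance (data_platform : List (List String)) : Decidable (Pre_move_platform data_platform) := by
  unfold Pre_move_platform; infer_instance

def pvWitness_move_platform : List (List String) :=
  [[".", "O"], ["O", "."], ["#", "O"]]

def Spec_move_platform (data_platform : List (List String)) (out : List (List String)) : Prop :=
  out = move_platform_alt data_platform
instance (data_platform : List (List String)) (out : List (List String)) :
    Decidable (Spec_move_platform data_platform out) := by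
  unfold Spec_move_platform; infer_instance

-- ===== CLAIM (what is proved, stated in full; the proofs are below) =====
def Claim_equal_move_platform : Prop :=
  ∀ (data_platform : List (List String)), Dom_move_platform data_platform →
    Pre_move_platform data_platform →
    Spec_move_platform data_platform (move_platform data_platform)

-- ===== LEMMAS AND PROOFS =====

theorem pvGetDSetSelf {α : Type} (l : List α) (i : Nat) (a d : α) (h : i < l.length) :
    (l.set i a).getD i d = a := by
  simp [List.getD, h]

-- ---- generic list-set helpers ----
theorem pvSetSame {α : Type} : ∀ (l : List α) (i : Nat) (a : α), l[i]? = some a → l.set i a = l := by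
  intro l
  induction l with
  | nil => intro i a h; simp at h
  | cons b t ih =>
    intro i a h
    cases i with
    | zero => simp at h; subst h; simp
    | succ n => simp at h; simp [ih n a h]

theorem pvSetOob {α : Type} : ∀ (l : List α) (i : Nat) (a : α), l.length ≤ i → l.set i a = l := by
  intro l
  induction l with
  | nil => intro i a _; simp
  | cons b t ih =>
    intro i a h
    cases i with
    | zero => simp at h
    | succ n => simp at h; simp [ih n a h]

theorem pvSetComm {α : Type} (l : List α) (i j : Nat) (a b : α) (h : i ≠ j) :
    (l.set i a).set j b = (l.set j b).set i a := List.set_comm a b h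

theorem pvSetSet {α : Type} (l : List α) (i : Nat) (a b : α) :
    (l.set i a).set i b = l.set i b := by simp

theorem pvMapSetGetD {α : Type} (g : List (List String)) (f : List String → α) (y : Nat) (b : α)
    (h : b = f (g.getD y [])) : (g.map f).set y b = g.map f := by
  by_cases hy : y < g.length
  · apply pvSetSame
    rw [List.getElem?_eq_getElem (by simpa using hy)]
    simp only [List.getElem_map, h]
    congr 1
    rw [List.getD, List.getElem?_eq_getElem hy]
    rfl
  · exact pvSetOob _ _ _ (by simp; omega)

-- ---- columns of a grid ----
def colOf (x : Nat) (g : List (List String)) : List String := g.map (fun r => r.getD x "")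

-- per-column image of colStep (reading a missing cell as "")
def colStepL (s : Nat × List String) (y : Nat) : Nat × List String :=
  if s.2.getD y "" = "O" then (s.1 + 1, (s.2.set y ".").set s.1 "O")
  else if s.2.getD y "" = "." then s
  else (y + 1, s.2)

def foldCol (c : List String) (k : Nat) : Nat × List String := (List.range k).foldl colStepL (0, c)

def settleCol (c : List String) : List String := (foldCol c c.length).2

theorem pvColOfGetD (x : Nat) (g : List (List String)) (y : Nat) :
    (colOf x g).getD y "" = (g.getD y []).getD x "" := by
  induction g generalizing y with
  | nil => simp [colOf, List.getD]
  | cons r t ih =>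
    cases y with
    | zero => simp [colOf, List.getD]
    | succ n =>
      simp only [colOf, List.map_cons, List.getD_cons_succ]
      exact ih n

theorem pvColOfLen (x : Nat) (g : List (List String)) : (colOf x g).length = g.length := by
  simp [colOf]

theorem pvColOfSetCellSelf (g : List (List String)) (y x : Nat) (v : String)
    (hx : x < (g.getD y []).length) :
    colOf x (setCell g y x v) = (colOf x g).set y v := by
  unfold colOf setCell
  rw [List.map_set]
  congr 1
  exact pvGetDSetSelf _ _ _ _ hx

theorem pvColOfSetCellNe (g : List (List String)) (y x x' : Nat) (v : String) (h : x' ≠ x) :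
    colOf x' (setCell g y x v) = colOf x' g := by
  unfold colOf setCell
  rw [List.map_set]
  have hv : ((g.getD y []).set x v).getD x' "" = (g.getD y []).getD x' "" :=
    pvGetDSetNe _ _ _ _ _ (fun he => h he.symm)
  rw [hv]
  exact pvMapSetGetD g (fun r => r.getD x' "") y _ rfl

theorem pvMapLenSetCell (g : List (List String)) (y x : Nat) (v : String) :
    (setCell g y x v).map List.length = g.map List.length := by
  unfold setCell
  rw [List.map_set, List.length_set]
  exact pvMapSetGetD g List.length y _ rfl

-- ---- invariant of the column sweep ----
theorem pvColInv (c : List String) : ∀ (k : Nat),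
    (foldCol c k).1 ≤ k ∧ (foldCol c k).2.length = c.length ∧
    (∀ t, k ≤ t → (foldCol c k).2.getD t "" = c.getD t "") ∧
    (∀ t, (foldCol c k).1 ≤ t → t < k → (foldCol c k).2.getD t "" = ".") := by
  intro k
  induction k with
  | zero => exact ⟨le_refl 0, rfl, fun t _ => rfl, fun t _ h => absurd h (by omega)⟩
  | succ k ih =>
    obtain ⟨h1, h2, h3, h4⟩ := ih
    have hstep : foldCol c (k + 1) = colStepL (foldCol c k) k := by
      unfold foldCol
      rw [List.range_succ, List.foldl_append]
      rfl
    rw [hstep]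
    rcases hsk : foldCol c k with ⟨f, d⟩
    rw [hsk] at h1 h2 h3 h4
    simp only at h1 h2 h3 h4
    unfold colStepL
    split_ifs with hO hD
    · simp only at hO ⊢
      have hkl : k < d.length := pvLtOfGetDNe _ _ _ (by rw [hO]; decide)
      refine ⟨by omega, by simp [List.length_set, h2], ?_, ?_⟩
      · intro t ht
        rw [pvGetDSetNe _ _ _ _ _ (show f ≠ t by omega),
          pvGetDSetNe _ _ _ _ _ (show k ≠ t by omega)]
        exact h3 t (by omega)
      · intro t ht1 ht2
        by_cases htk : t = k
        · subst htk
          rw [pvGetDSetNe _ _ _ _ _ (show f ≠ t by omega)]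
          exact pvGetDSetSelf _ _ _ _ hkl
        · rw [pvGetDSetNe _ _ _ _ _ (show f ≠ t by omega),
            pvGetDSetNe _ _ _ _ _ (show k ≠ t by omega)]
          exact h4 t (by omega) (by omega)
    · simp only at hO hD ⊢
      refine ⟨by omega, h2, fun t ht => h3 t (by omega), ?_⟩
      intro t ht1 ht2
      by_cases htk : t = k
      · subst htk; exact hD
      · exact h4 t ht1 (by omega)
    · simp only at ⊢
      exact ⟨by omega, h2, fun t ht => h3 t (by omega), fun t ht1 ht2 => absurd ht2 (by omega)⟩

theorem pvStepFoldCol (c : List String) (k : Nat) :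
    foldCol c (k + 1) = colStepL (foldCol c k) k := by
  unfold foldCol
  rw [List.range_succ, List.foldl_append]
  rfl

theorem pvFoldlRangeAdd {σ : Type} (f : σ → Nat → σ) (s : σ) (a b : Nat) :
    (List.range (a + b)).foldl f s = ((List.range b).map (a + ·)).foldl f ((List.range a).foldl f s) := by
  rw [List.range_add, List.foldl_append]

-- a column without round rocks is left unchanged by the sweep
theorem pvSettleColNoO (c : List String) (h : ∀ t, c.getD t "" ≠ "O") : settleCol c = c := by
  have aux : ∀ k, (foldCol c k).2 = c := by
    intro k
    induction k with
    | zero => rfl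
    | succ k ih =>
      rw [pvStepFoldCol]
      unfold colStepL
      split_ifs with hO hD
      · rw [ih] at hO; exact absurd hO (h k)
      · exact ih
      · exact ih
  exact aux c.length

def pvStableCol (c : List String) : Prop :=
  ∀ y, 0 < y → c.getD y "" = "O" → c.getD (y - 1) "" ≠ "."

-- a stable column is a fixed point of the sweep
theorem pvSettleColStable (c : List String) (h : pvStableCol c) : settleCol c = c := by
  have aux : ∀ k, (foldCol c k).2 = c := by
    intro k
    induction k with
    | zero => rfl
    | succ k ih =>
      rw [pvStepFoldCol]
      obtain ⟨h1, h2, h3, h4⟩ := pvColInv c k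
      unfold colStepL
      split_ifs with hO hD
      · rw [ih] at hO
        simp only
        have hf : (foldCol c k).1 = k := by
          by_contra hne
          have hfk : (foldCol c k).1 < k := lt_of_le_of_ne h1 hne
          have hdot : c.getD (k - 1) "" = "." := by
            have := h4 (k - 1) (by omega) (by omega)
            rwa [ih] at this
          exact h k (by omega) hO hdot
        rw [ih, hf, pvSetSet]
        exact pvSetSame c k "O"
          (pvGetElemSomeOfGetD c k "" "O" hO (pvLtOfGetDNe _ _ _ (by rw [hO]; decide)))
      · exact ih
      · exact ih
  exact aux c.length

-- moving one rock one step up (A's elementary shift) does not change the settled column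
theorem pvSettleColSwap (c : List String) (y : Nat) (hy : 0 < y)
    (hO : c.getD y "" = "O") (hD : c.getD (y - 1) "" = ".") :
    settleCol ((c.set (y - 1) "O").set y ".") = settleCol c := by
  have hyl : y < c.length := pvLtOfGetDNe _ _ _ (by rw [hO]; decide)
  have hlen : ((c.set (y - 1) "O").set y ".").length = c.length := by
    simp [List.length_set]
  have stage1 : ∀ k, k ≤ y - 1 → foldCol ((c.set (y - 1) "O").set y ".") k =
      ((foldCol c k).1, ((foldCol c k).2.set (y - 1) "O").set y ".") := by
    intro k
    induction k with
    | zero => intro _; rfl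
    | succ k ih =>
      intro hk
      have hky1 : k < y - 1 := by omega
      rw [pvStepFoldCol, pvStepFoldCol, ih (by omega)]
      obtain ⟨h1, h2, h3, h4⟩ := pvColInv c k
      rcases hsk : foldCol c k with ⟨f, d⟩
      rw [hsk] at h1 h2 h3 h4
      simp only at h1 h2 h3 h4 ⊢
      have hread : ((d.set (y - 1) "O").set y ".").getD k "" = d.getD k "" := by
        rw [pvGetDSetNe _ _ _ _ _ (show y ≠ k by omega),
          pvGetDSetNe _ _ _ _ _ (show y - 1 ≠ k by omega)]
      unfold colStepL
      simp only [hread]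
      split_ifs with hOk hDk
      · simp only
        refine Prod.ext rfl ?_
        simp only
        rw [pvSetComm _ _ _ _ _ (show y ≠ k by omega),
          pvSetComm _ _ _ _ _ (show y - 1 ≠ k by omega),
          pvSetComm _ _ _ _ _ (show y ≠ f by omega),
          pvSetComm _ _ _ _ _ (show y - 1 ≠ f by omega)]
      · rfl
      · rfl
  obtain ⟨h1, h2, h3, h4⟩ := pvColInv c (y - 1)
  have e1 := stage1 (y - 1) (le_refl _)
  rcases hsk : foldCol c (y - 1) with ⟨f, d⟩
  rw [hsk] at e1 h1 h2 h3 h4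
  simp only at e1 h1 h2 h3 h4
  have hdy1 : d.getD (y - 1) "" = "." := by rw [h3 (y - 1) (le_refl _)]; exact hD
  have hdy : d.getD y "" = "O" := by rw [h3 y (by omega)]; exact hO
  have hdl : y < d.length := by rw [h2]; exact hyl
  have hd1l : y - 1 < d.length := by omega
  have hsplit : ∀ (cc : List String), foldCol cc (y + 1) =
      colStepL (colStepL (foldCol cc (y - 1)) (y - 1)) y := by
    intro cc
    have hy2 : y + 1 = (y - 1) + 2 := by omega
    rw [hy2]
    unfold foldCol
    rw [pvFoldlRangeAdd colStepL (0, cc) (y - 1) 2]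
    have hr2 : (List.range 2).map ((y - 1) + ·) = [y - 1, y] := by
      have : (y - 1) + 1 = y := by omega
      simp [List.range_succ, this]
    rw [hr2]
    rfl
  have s1 : colStepL (f, d) (y - 1) = (f, d) := by
    simp only [colStepL, hdy1]
    simp
  have s2 : colStepL (f, d) y = (f + 1, (d.set y ".").set f "O") := by
    simp only [colStepL, hdy]
    simp
  have hDy1 : ((d.set (y - 1) "O").set y ".").getD (y - 1) "" = "O" := by
    rw [pvGetDSetNe _ _ _ _ _ (show y ≠ y - 1 by omega)]
    exact pvGetDSetSelf _ _ _ _ hd1l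
  have s3 : colStepL (f, (d.set (y - 1) "O").set y ".") (y - 1) =
      (f + 1, ((((d.set (y - 1) "O").set y ".").set (y - 1) ".").set f "O")) := by
    simp only [colStepL, hDy1]
    simp
  have key : (((d.set (y - 1) "O").set y ".").set (y - 1) ".").set f "O" =
      (d.set y ".").set f "O" := by
    congr 1
    rw [pvSetComm _ _ _ _ _ (show y ≠ y - 1 by omega), pvSetSet]
    rw [pvSetSame d (y - 1) "." (pvGetElemSomeOfGetD d (y - 1) "" "." hdy1 hd1l)]
  have s4 : colStepL (f + 1, (d.set y ".").set f "O") y = (f + 1, (d.set y ".").set f "O") := by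
    have hv : ((d.set y ".").set f "O").getD y "" = "." := by
      rw [pvGetDSetNe _ _ _ _ _ (show f ≠ y by omega)]
      exact pvGetDSetSelf _ _ _ _ hdl
    simp only [colStepL, hv]
    simp
  have hmid : foldCol ((c.set (y - 1) "O").set y ".") (y + 1) = foldCol c (y + 1) := by
    rw [hsplit, hsplit, hsk, e1, s1, s2, s3, key, s4]
  unfold settleCol
  rw [hlen]
  have hclen : c.length = (y + 1) + (c.length - (y + 1)) := by omega
  rw [hclen]
  unfold foldCol
  unfold foldCol at hmid
  rw [pvFoldlRangeAdd colStepL (0, (c.set (y - 1) "O").set y ".") (y + 1) _,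
    pvFoldlRangeAdd colStepL (0, c) (y + 1) _, hmid]

-- ---- grid sweep simulated by the column sweep ----
theorem pvStepFoldGrid (x : Nat) (h : List (List String)) (k : Nat) :
    (List.range (k + 1)).foldl (colStep x) (0, h) =
      colStep x ((List.range k).foldl (colStep x) (0, h)) k := by
  rw [List.range_succ, List.foldl_append]
  rfl

theorem pvGridColSim (x : Nat) (h : List (List String)) : ∀ k,
    ((List.range k).foldl (colStep x) (0, h)).1 = (foldCol (colOf x h) k).1 ∧
    colOf x ((List.range k).foldl (colStep x) (0, h)).2 = (foldCol (colOf x h) k).2 ∧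
    (∀ x', x' ≠ x → colOf x' ((List.range k).foldl (colStep x) (0, h)).2 = colOf x' h) ∧
    ((List.range k).foldl (colStep x) (0, h)).2.map List.length = h.map List.length := by
  intro k
  induction k with
  | zero => exact ⟨rfl, rfl, fun _ _ => rfl, rfl⟩
  | succ k ih =>
    obtain ⟨i1, i2, i3, i4⟩ := ih
    obtain ⟨h1, h2, h3, h4⟩ := pvColInv (colOf x h) k
    rw [pvStepFoldGrid, pvStepFoldCol]
    rcases hs : foldCol (colOf x h) k with ⟨fc, c⟩
    rcases hS : (List.range k).foldl (colStep x) (0, h) with ⟨f, G⟩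
    rw [hS, hs] at i1 i2
    rw [hS] at i3 i4
    rw [hs] at h1 h2 h3 h4
    simp only at i1 i2 i3 i4 h1 h2 h3 h4
    subst i1
    have hread : (G.getD k []).getD x "" = c.getD k "" := by
      rw [← i2, pvColOfGetD]
    by_cases hlen : (G.getD k []).length ≤ x
    · have hv : c.getD k "" = "" := by
        rw [← hread]
        exact List.getD_eq_default _ _ hlen
      have eg : colStep x (f, G) k = (k + 1, G) := by
        simp only [colStep]
        rw [if_pos hlen]
      have ec : colStepL (f, c) k = (k + 1, c) := by
        simp only [colStepL, hv]
        simp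
      rw [eg, ec]
      exact ⟨rfl, i2, i3, i4⟩
    · have hxlen : x < (G.getD k []).length := by omega
      by_cases hO : (G.getD k []).getD x "" = "O"
      · have hvO : c.getD k "" = "O" := by rw [← hread]; exact hO
        have eg : colStep x (f, G) k = (f + 1, setCell (setCell G k x ".") f x "O") := by
          simp only [colStep]
          rw [if_neg (by omega), if_pos hO]
        have ec : colStepL (f, c) k = (f + 1, (c.set k ".").set f "O") := by
          simp only [colStepL, hvO]
          simp
        rw [eg, ec]
        have hkG : k < G.length := by
          apply pvLtOfGetDNe G k ([] : List String)
          intro hh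
          rw [hh] at hxlen
          simp at hxlen
        have e1 : colOf x (setCell G k x ".") = c.set k "." := by
          rw [pvColOfSetCellSelf G k x "." hxlen, i2]
        have hfx : x < ((setCell G k x ".").getD f []).length := by
          by_cases hfk : f = k
          · subst hfk
            unfold setCell
            rw [pvGetDSetSelf _ _ _ _ hkG, List.length_set]
            exact hxlen
          · have hfk' : f < k := lt_of_le_of_ne h1 hfk
            have hdot : c.getD f "" = "." := h4 f (le_refl f) hfk'
            rw [← i2, pvColOfGetD] at hdot
            have hxf : x < (G.getD f []).length := pvLtOfGetDNe _ _ _ (by rw [hdot]; decide)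
            unfold setCell
            rw [pvGetDSetNe _ _ _ _ _ (show k ≠ f by omega)]
            exact hxf
        have e2 : colOf x (setCell (setCell G k x ".") f x "O") = (c.set k ".").set f "O" := by
          rw [pvColOfSetCellSelf _ f x "O" hfx, e1]
        refine ⟨rfl, e2, ?_, ?_⟩
        · intro x' hx'
          rw [pvColOfSetCellNe _ f x x' "O" hx', pvColOfSetCellNe _ k x x' "." hx']
          exact i3 x' hx'
        · rw [pvMapLenSetCell, pvMapLenSetCell]
          exact i4
      · by_cases hDot : (G.getD k []).getD x "" = "."
        · have hv : c.getD k "" = "." := by rw [← hread]; exact hDot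
          have eg : colStep x (f, G) k = (f, G) := by
            simp only [colStep]
            rw [if_neg (by omega), if_neg hO, if_neg (fun hc => hc hDot)]
          have ec : colStepL (f, c) k = (f, c) := by
            simp only [colStepL, hv]
            simp
          rw [eg, ec]
          exact ⟨rfl, i2, i3, i4⟩
        · have hcO : ¬(c.getD k "" = "O") := by rw [← hread]; exact hO
          have hcD : ¬(c.getD k "" = ".") := by rw [← hread]; exact hDot
          have eg : colStep x (f, G) k = (k + 1, G) := by
            simp only [colStep]
            rw [if_neg (by omega), if_neg hO, if_pos hDot]
          have ec : colStepL (f, c) k = (k + 1, c) := by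
            simp only [colStepL]
            rw [if_neg hcO, if_neg hcD]
          rw [eg, ec]
          exact ⟨rfl, i2, i3, i4⟩

theorem pvSettleColGridCol (x : Nat) (h : List (List String)) :
    colOf x (settleColGrid x h) = settleCol (colOf x h) ∧
    (∀ x', x' ≠ x → colOf x' (settleColGrid x h) = colOf x' h) ∧
    (settleColGrid x h).map List.length = h.map List.length := by
  obtain ⟨i1, i2, i3, i4⟩ := pvGridColSim x h h.length
  refine ⟨?_, i3, i4⟩
  unfold settleColGrid settleCol
  rw [pvColOfLen]
  exact i2

theorem pvOuterInv (g : List (List String)) : ∀ w,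
    ((List.range w).foldl (fun h x => settleColGrid x h) g).map List.length = g.map List.length ∧
    (∀ x, x < w → colOf x ((List.range w).foldl (fun h x => settleColGrid x h) g) = settleCol (colOf x g)) ∧
    (∀ x, w ≤ x → colOf x ((List.range w).foldl (fun h x => settleColGrid x h) g) = colOf x g) := by
  intro w
  induction w with
  | zero => exact ⟨rfl, fun x hx => absurd hx (by omega), fun _ _ => rfl⟩
  | succ w ih =>
    obtain ⟨i1, i2, i3⟩ := ih
    have hstep : (List.range (w + 1)).foldl (fun h x => settleColGrid x h) g =
        settleColGrid w ((List.range w).foldl (fun h x => settleColGrid x h) g) := by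
      rw [List.range_succ, List.foldl_append]
      rfl
    rw [hstep]
    obtain ⟨c1, c2, c3⟩ := pvSettleColGridCol w ((List.range w).foldl (fun h x => settleColGrid x h) g)
    refine ⟨c3.trans i1, ?_, ?_⟩
    · intro x hx
      by_cases hxw : x = w
      · subst hxw
        rw [c1, i3 x (le_refl x)]
      · rw [c2 x hxw]
        exact i2 x (by omega)
    · intro x hx
      rw [c2 x (by omega)]
      exact i3 x (by omega)

theorem pvFoldlMaxLe : ∀ (l : List (List String)) (m : Nat),
    m ≤ l.foldl (fun a r => max a r.length) m := by
  intro l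
  induction l with
  | nil => intro m; exact le_refl m
  | cons r t ih =>
    intro m
    exact le_trans (le_max_left m r.length) (ih _)

theorem pvWidthSpec (g : List (List String)) : ∀ r ∈ g, r.length ≤ widthG g := by
  have aux : ∀ (l : List (List String)) (m : Nat) (r : List String), r ∈ l →
      r.length ≤ l.foldl (fun a r => max a r.length) m := by
    intro l
    induction l with
    | nil => intro m r hr; simp at hr
    | cons s t ih =>
      intro m r hr
      rcases List.mem_cons.mp hr with h | h
      · subst h
        exact le_trans (le_max_right m r.length) (pvFoldlMaxLe t _)
      · exact ih _ r h
  intro r hr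
  exact aux g 0 r hr

theorem pvChar (g : List (List String)) :
    (move_platform_alt g).map List.length = g.map List.length ∧
    ∀ x, colOf x (move_platform_alt g) = settleCol (colOf x g) := by
  obtain ⟨i1, i2, i3⟩ := pvOuterInv g (widthG g)
  unfold move_platform_alt
  refine ⟨i1, fun x => ?_⟩
  by_cases hx : x < widthG g
  · exact i2 x hx
  · rw [i3 x (by omega)]
    have hno : ∀ t, (colOf x g).getD t "" ≠ "O" := by
      intro t
      rw [pvColOfGetD]
      by_cases ht : t < g.length
      · have hmem : g.getD t [] ∈ g := by
          rw [List.getD_eq_getElem _ _ ht]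
          exact List.getElem_mem _
        have hw := pvWidthSpec g _ hmem
        rw [List.getD_eq_default _ _ (by omega)]
        decide
      · rw [List.getD_eq_default g _ (by omega)]
        simp [List.getD]
    rw [pvSettleColNoO _ hno]

theorem pvRowExt : ∀ (r r' : List String), r.length = r'.length →
    (∀ x, r.getD x "" = r'.getD x "") → r = r' := by
  intro r
  induction r with
  | nil =>
    intro r' hl _
    cases r' with
    | nil => rfl
    | cons b t' => simp at hl
  | cons a t ih =>
    intro r' hl hv
    cases r' with
    | nil => simp at hl
    | cons b t' =>
      have h0 := hv 0
      simp only [List.getD_cons_zero] at h0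
      have ht := ih t' (by simpa using hl) (fun x => by
        have := hv (x + 1)
        simpa only [List.getD_cons_succ] using this)
      rw [h0, ht]

theorem pvGridExt : ∀ (g h : List (List String)), g.map List.length = h.map List.length →
    (∀ x, colOf x g = colOf x h) → g = h := by
  intro g
  induction g with
  | nil =>
    intro h hl _
    cases h with
    | nil => rfl
    | cons r' t' => simp at hl
  | cons r t ih =>
    intro h hl hc
    cases h with
    | nil => simp at hl
    | cons r' t' =>
      simp only [List.map_cons, List.cons.injEq] at hl
      have hcol : ∀ x, r.getD x "" = r'.getD x "" ∧ colOf x t = colOf x t' := by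
        intro x
        have := hc x
        simp only [colOf, List.map_cons, List.cons.injEq] at this
        exact this
      rw [pvRowExt r r' hl.1 (fun x => (hcol x).1), ih t' hl.2 (fun x => (hcol x).2)]

-- A's elementary shift does not change B's settled grid
theorem pvSettleSwap (g : List (List String)) (y x : Nat) (hy : 0 < y)
    (hO : (g.getD y []).getD x "" = "O") (hD : (g.getD (y - 1) []).getD x "" = ".") :
    move_platform_alt (setCell (setCell g (y - 1) x "O") y x ".") = move_platform_alt g := by
  obtain ⟨hx, hyl⟩ := pvCellValid g y x (by rw [hO]; decide)
  obtain ⟨hx1, hy1l⟩ := pvCellValid g (y - 1) x (by rw [hD]; decide)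
  obtain ⟨a1, a2⟩ := pvChar (setCell (setCell g (y - 1) x "O") y x ".")
  obtain ⟨b1, b2⟩ := pvChar g
  apply pvGridExt
  · rw [a1, b1, pvMapLenSetCell, pvMapLenSetCell]
  · intro x'
    rw [a2 x', b2 x']
    by_cases hxx : x' = x
    · subst hxx
      have hrow : (setCell g (y - 1) x' "O").getD y [] = g.getD y [] :=
        pvGetDSetNe _ _ _ _ _ (show y - 1 ≠ y by omega)
      have e : colOf x' (setCell (setCell g (y - 1) x' "O") y x' ".") =
          ((colOf x' g).set (y - 1) "O").set y "." := by
        rw [pvColOfSetCellSelf _ y x' "." (by rw [hrow]; exact hx),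
          pvColOfSetCellSelf _ (y - 1) x' "O" hx1]
      rw [e]
      exact pvSettleColSwap (colOf x' g) y hy (by rw [pvColOfGetD]; exact hO)
        (by rw [pvColOfGetD]; exact hD)
    · congr 1
      rw [pvColOfSetCellNe _ y x x' "." hxx, pvColOfSetCellNe _ (y - 1) x x' "O" hxx]

def pvStableG (g : List (List String)) : Prop :=
  ∀ y x, 0 < y → (g.getD y []).getD x "" = "O" → (g.getD (y - 1) []).getD x "" ≠ "."

theorem pvSettleStable (g : List (List String)) (h : pvStableG g) : move_platform_alt g = g := by
  obtain ⟨b1, b2⟩ := pvChar g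
  apply pvGridExt _ _ b1
  intro x
  rw [b2 x]
  apply pvSettleColStable
  intro y hy hOy
  rw [pvColOfGetD] at hOy
  rw [pvColOfGetD]
  exact h y x hy hOy

-- ---- A-side bookkeeping ----
theorem pvStepCellMono (y x : Nat) (s : Nat × List (List String)) : s.1 ≤ (stepCell y x s).1 := by
  unfold stepCell
  split_ifs <;> simp

theorem pvFoldlMono {α : Type} (f : (Nat × List (List String)) → α → (Nat × List (List String)))
    (hf : ∀ s a, s.1 ≤ (f s a).1) : ∀ (l : List α) (s), s.1 ≤ (l.foldl f s).1 := by
  intro l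
  induction l with
  | nil => intro s; exact le_refl _
  | cons a t ih => intro s; exact le_trans (hf s a) (ih _)

theorem pvStepQ (g : List (List String)) (y x : Nat) (s : Nat × List (List String))
    (hP : s.1 = 0 → s.2 = g) : (stepCell y x s).1 = 0 → (stepCell y x s).2 = g := by
  unfold stepCell
  split_ifs
  · intro h0
    simp at h0
  all_goals exact hP

theorem pvFoldQ (g : List (List String)) : ∀ (l : List Nat) (s : Nat × List (List String)),
    (s.1 = 0 → s.2 = g) → ((l.foldl passRow s).1 = 0 → (l.foldl passRow s).2 = g) :=
  fun l s h => pvFoldlInv (fun s => s.1 = 0 → s.2 = g) passRow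
    (fun s' y hP => pvFoldlInv _ _ (fun s'' x h'' => pvStepQ g y x s'' h'') _ s' hP) l s h

theorem pvPassRowMono (s : Nat × List (List String)) (y : Nat) : s.1 ≤ (passRow s y).1 :=
  pvFoldlMono _ (fun s' a => pvStepCellMono y a s') _ s

theorem pvPassQ (g : List (List String)) (h0 : (passGrid g).1 = 0) : (passGrid g).2 = g :=
  pvFoldQ g _ (0, g) (fun _ => rfl) h0

theorem pvPass0Stable (g : List (List String)) (h0 : (passGrid g).1 = 0) : pvStableG g := by
  intro y x hy hO hD
  obtain ⟨hx, hyl⟩ := pvCellValid g y x (by rw [hO]; decide)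
  have hdecomp : passGrid g = ((List.range (g.length - (y + 1))).map ((y + 1) + ·)).foldl passRow
      ((List.range (y + 1)).foldl passRow (0, g)) := by
    unfold passGrid
    conv_lhs => rw [show g.length = (y + 1) + (g.length - (y + 1)) from by omega]
    rw [pvFoldlRangeAdd]
  have hmidstep : (List.range (y + 1)).foldl passRow ((0 : Nat), g) =
      passRow ((List.range y).foldl passRow (0, g)) y := by
    rw [List.range_succ, List.foldl_append]
    rfl
  have hm2 : ((List.range (y + 1)).foldl passRow ((0 : Nat), g)).1 ≤ (passGrid g).1 := by
    rw [hdecomp]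
    exact pvFoldlMono passRow pvPassRowMono _ _
  have hFs1 : (passRow ((List.range y).foldl passRow (0, g)) y).1 = 0 := by
    rw [← hmidstep]
    omega
  have hs10 : ((List.range y).foldl passRow ((0 : Nat), g)).1 = 0 := by
    have := pvPassRowMono ((List.range y).foldl passRow ((0 : Nat), g)) y
    omega
  have hs1g : ((List.range y).foldl passRow ((0 : Nat), g)).2 = g :=
    pvFoldQ g _ (0, g) (fun _ => rfl) hs10
  have hs1eq : (List.range y).foldl passRow ((0 : Nat), g) = (0, g) := by
    rcases hse : (List.range y).foldl passRow ((0 : Nat), g) with ⟨a, G⟩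
    rw [hse] at hs10 hs1g
    simp only at hs10 hs1g
    rw [hs10, hs1g]
  rw [hs1eq] at hFs1
  -- now split passRow (0, g) y at column x
  have hpr : passRow ((0 : Nat), g) y =
      (List.range ((g.getD y []).length)).foldl (fun s' xx => stepCell y xx s') ((0 : Nat), g) := rfl
  have hdec2 : passRow ((0 : Nat), g) y =
      ((List.range ((g.getD y []).length - (x + 1))).map ((x + 1) + ·)).foldl
        (fun s' xx => stepCell y xx s')
        ((List.range (x + 1)).foldl (fun s' xx => stepCell y xx s') (0, g)) := by
    rw [hpr]
    conv_lhs => rw [show (g.getD y []).length = (x + 1) + ((g.getD y []).length - (x + 1)) from by omega]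
    rw [pvFoldlRangeAdd]
  have hmid2 : (List.range (x + 1)).foldl (fun s' xx => stepCell y xx s') ((0 : Nat), g) =
      stepCell y x ((List.range x).foldl (fun s' xx => stepCell y xx s') (0, g)) := by
    rw [List.range_succ, List.foldl_append]
    rfl
  have hm3 : ((List.range (x + 1)).foldl (fun s' xx => stepCell y xx s') ((0 : Nat), g)).1 ≤
      (passRow ((0 : Nat), g) y).1 := by
    rw [hdec2]
    exact pvFoldlMono _ (fun s' a => pvStepCellMono y a s') _ _
  have hs20 : ((List.range x).foldl (fun s' xx => stepCell y xx s') ((0 : Nat), g)).1 = 0 := by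
    have ha := pvStepCellMono y x ((List.range x).foldl (fun s' xx => stepCell y xx s') ((0 : Nat), g))
    rw [hFs1] at hm3
    rw [hmid2] at hm3
    omega
  have hs2g : ((List.range x).foldl (fun s' xx => stepCell y xx s') ((0 : Nat), g)).2 = g :=
    pvFoldlInv (fun s => s.1 = 0 → s.2 = g) _
      (fun s'' xx h'' => pvStepQ g y xx s'' h'') _ (0, g) (fun _ => rfl) hs20
  have hs2eq : (List.range x).foldl (fun s' xx => stepCell y xx s') ((0 : Nat), g) = (0, g) := by
    rcases hse : (List.range x).foldl (fun s' xx => stepCell y xx s') ((0 : Nat), g) with ⟨a, G⟩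
    rw [hse] at hs20 hs2g
    simp only at hs20 hs2g
    rw [hs20, hs2g]
  have hstep1 : (stepCell y x ((0 : Nat), g)).1 = 1 := by
    simp only [stepCell]
    rw [if_pos (show y > 0 from hy), if_pos hO, if_pos hD]
  rw [hs2eq] at hmid2
  rw [hmid2, hstep1, hFs1] at hm3
  omega

theorem pvSettlePass (g : List (List String)) :
    move_platform_alt (passGrid g).2 = move_platform_alt g := by
  refine pvFoldlInv (fun s => move_platform_alt s.2 = move_platform_alt g) passRow ?_ _ (0, g) rfl
  intro s y hP
  refine pvFoldlInv (fun s' => move_platform_alt s'.2 = move_platform_alt g) _ ?_ _ s hP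
  intro s' xx hP'
  unfold stepCell
  split_ifs with hh1 hh2 hh3
  · simp only
    rw [pvSettleSwap s'.2 y xx hh1 hh2 hh3]
    exact hP'
  all_goals exact hP'

theorem pvMain : ∀ (n : Nat) (g : List (List String)), phi g ≤ n →
    move_platform g = move_platform_alt g := by
  intro n
  induction n with
  | zero =>
    intro g hg
    rw [move_platform]
    by_cases hp : (passGrid g).1 = 0
    · rw [dif_pos hp, pvPassQ g hp, pvSettleStable g (pvPass0Stable g hp)]
    · exfalso
      have := pass_phi g
      omega
  | succ n ih =>
    intro g hg
    rw [move_platform]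
    by_cases hp : (passGrid g).1 = 0
    · rw [dif_pos hp, pvPassQ g hp, pvSettleStable g (pvPass0Stable g hp)]
    · rw [dif_neg hp]
      have hlt : phi (passGrid g).2 ≤ n := by
        have := pass_phi g
        omega
      rw [ih _ hlt, pvSettlePass]

-- ===== VERDICT (by name: the statement is the Claim_ definition above) =====
theorem move_platform_spec : Claim_equal_move_platform := by
  intro g _ _
  unfold Spec_move_platform
  exact pvMain (phi g) g le_rfl
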